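-- pv_equiv track=rewrite | github.com/Kion14/Scriptie-Models-Etc | train_unet_all.py | identify_files
-- ===== SOURCE A (Python) =====
-- def identify_files(files):
--     image_file = None
--     instance_file = None
--     seg_file = None
--
--     for f in sorted(files):
--         name = f.lower()
--
--         if "instancemask" in name:
--             instance_file = f
--         elif "mask" in name and "instancemask" not in name:
--             seg_file = f
--         elif name.endswith("-img.tif") or name.endswith("-img.tiff"):
--             image_file = f
--
--     return image_file, instance_file, seg_file
-- ===== SOURCE B (Python) =====
-- def identify_files(files):
--     instance_file = max((f for f in files if "instancemask" in f.lower()), default=None)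
--     seg_file = max(
--         (f for f in files
--          if "mask" in f.lower() and "instancemask" not in f.lower()),
--         default=None,
--     )
--     image_file = max(
--         (f for f in files
--          if "mask" not in f.lower()
--          and (f.lower().endswith("-img.tif") or f.lower().endswith("-img.tiff"))),
--         default=None,
--     )
--     return image_file, instance_file, seg_file
-- ===== Notes on version B (the rewrite author's own statement) =====
-- stated objective: simpler
-- what changed: Replaces the sort followed by a stateful last-match-wins loop with three independent max-reductions over filtered views of the original list (no sort, no shared loop state).
import Mathlib
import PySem

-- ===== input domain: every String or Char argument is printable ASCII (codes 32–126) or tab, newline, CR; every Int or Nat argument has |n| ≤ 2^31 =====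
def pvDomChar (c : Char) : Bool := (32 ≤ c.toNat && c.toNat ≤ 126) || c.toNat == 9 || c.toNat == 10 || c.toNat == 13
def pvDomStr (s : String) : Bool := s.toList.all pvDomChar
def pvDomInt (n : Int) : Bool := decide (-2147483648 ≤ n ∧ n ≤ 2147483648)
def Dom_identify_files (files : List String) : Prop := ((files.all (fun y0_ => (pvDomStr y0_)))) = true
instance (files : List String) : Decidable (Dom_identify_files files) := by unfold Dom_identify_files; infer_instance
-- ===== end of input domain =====

-- B replaces A's sort + stateful last-match loop with three independent max-reductions over filtered views of the original list (objective: simpler).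


-- ===== PORT A =====
def identify_files (files : List String) : Option String × Option String × Option String :=
  (PySem.List.sorted files (fun f => f) false).foldl
    (fun s f =>
      let name := PySem.Str.lower f
      if PySem.Str.isIn "instancemask" name then
        ⟨s.1, some f, s.2.2⟩
      else if PySem.Str.isIn "mask" name && !PySem.Str.isIn "instancemask" name then
        ⟨s.1, s.2.1, some f⟩
      else if PySem.Str.endswith name "-img.tif" || PySem.Str.endswith name "-img.tiff" then
        ⟨some f, s.2.1, s.2.2⟩
      else s)
    ⟨none, none, none⟩

-- ===== PORT B =====
-- B-side helpers: the three filter predicates of Source B's generator expressions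
def pInst (f : String) : Bool := PySem.Str.isIn "instancemask" (PySem.Str.lower f)
def pSeg (f : String) : Bool :=
  PySem.Str.isIn "mask" (PySem.Str.lower f) && !PySem.Str.isIn "instancemask" (PySem.Str.lower f)
def pImg (f : String) : Bool :=
  !PySem.Str.isIn "mask" (PySem.Str.lower f) &&
    (PySem.Str.endswith (PySem.Str.lower f) "-img.tif" ||
      PySem.Str.endswith (PySem.Str.lower f) "-img.tiff")
def identify_files_alt (files : List String) : Option String × Option String × Option String :=
  let instance_file := PySem.List.max? (files.filter pInst) (fun x => x)
  let seg_file := PySem.List.max? (files.filter pSeg) (fun x => x)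
  let image_file := PySem.List.max? (files.filter pImg) (fun x => x)
  ⟨image_file, instance_file, seg_file⟩

-- ===== PRECONDITION & SPEC =====
def Spec_identify_files (files : List String) (out : Option String × Option String × Option String) : Prop := out = identify_files_alt files
instance (files : List String) (out : Option String × Option String × Option String) : Decidable (Spec_identify_files files out) := by unfold Spec_identify_files; infer_instance

-- ===== CLAIM (what is proved, stated in full; the proofs are below) =====
def Claim_equal_identify_files : Prop := ∀ (files : List String), Dom_identify_files files → Spec_identify_files files (identify_files files)

-- ===== LEMMAS AND PROOFS =====\n
-- "instancemask" in name implies "mask" in name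
lemma mask_of_inst (s : String) :
    PySem.Str.isIn "instancemask" s = true → PySem.Str.isIn "mask" s = true := by
  intro h
  rw [PySem.Str.isIn_eq, PySem.Chars.isIn_iff_infix] at h ⊢
  exact List.IsInfix.trans (by decide) h

-- A's loop body, rewritten as three independent conditional updates (the three predicates are pairwise exclusive)
lemma step_eq (s : Option String × Option String × Option String) (f : String) :
    (let name := PySem.Str.lower f
     if PySem.Str.isIn "instancemask" name then
       (⟨s.1, some f, s.2.2⟩ : Option String × Option String × Option String)
     else if PySem.Str.isIn "mask" name && !PySem.Str.isIn "instancemask" name then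
       ⟨s.1, s.2.1, some f⟩
     else if PySem.Str.endswith name "-img.tif" || PySem.Str.endswith name "-img.tiff" then
       ⟨some f, s.2.1, s.2.2⟩
     else s) =
    ⟨if pImg f then some f else s.1,
     if pInst f then some f else s.2.1,
     if pSeg f then some f else s.2.2⟩ := by
  simp only [pImg, pInst, pSeg]
  by_cases hI : PySem.Str.isIn "instancemask" (PySem.Str.lower f) = true
  · have hM := mask_of_inst _ hI
    simp only [hI, hM, Bool.not_true, Bool.and_false, Bool.false_and]
    simp
  · by_cases hM : PySem.Str.isIn "mask" (PySem.Str.lower f) = true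
    · simp only [hI, hM, Bool.not_false, Bool.true_and]
      simp
    · simp only [hI, hM, Bool.not_false, Bool.false_and, Bool.true_and]
      simp
      split_ifs <;> rfl

-- last-value-wins accumulator
lemma foldl_last (m : List String) (a : Option String) :
    m.foldl (fun _ x => some x) a = m.getLast?.or a := by
  induction m generalizing a with
  | nil => rfl
  | cons x t ih =>
      simp only [List.foldl_cons, ih, List.getLast?_cons]
      cases t.getLast? <;> rfl

-- in a ≤-sorted list every element is ≤ the last one
lemma le_getLast_of_pairwise (l : List String) (hpw : l.Pairwise (· ≤ ·)) (hne : l ≠ [])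
    (y : String) (hy : y ∈ l) : y ≤ l.getLast hne := by
  induction l with
  | nil => exact absurd rfl hne
  | cons x t ih =>
      rcases List.pairwise_cons.1 hpw with ⟨hx, hpt⟩
      cases t with
      | nil =>
          simp only [List.mem_cons, List.not_mem_nil, or_false] at hy
          simp [hy]
      | cons a t' =>
          have hne' : (a :: t') ≠ [] := by simp
          rw [List.getLast_cons hne']
          rcases List.mem_cons.1 hy with rfl | hyt
          · exact hx _ (List.getLast_mem hne')
          · exact ih hpt hne' hyt

-- last element of the sorted-then-filtered list = first maximum of the filtered original
lemma last_sorted_filter (files : List String) (p : String → Bool) :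
    ((PySem.List.sorted files (fun f => f) false).filter p).getLast? =
      PySem.List.max? (files.filter p) (fun x => x) := by
  have hperm : ((PySem.List.sorted files (fun f => f) false).filter p).Perm (files.filter p) :=
    (PySem.List.sorted_perm files (fun f => f) false).filter p
  have hpw : ((PySem.List.sorted files (fun f => f) false).filter p).Pairwise (· ≤ ·) :=
    List.Pairwise.sublist List.filter_sublist (PySem.List.sorted_pairwise files (fun f => f))
  set l := (PySem.List.sorted files (fun f => f) false).filter p with hl
  rcases hmx : PySem.List.max? (files.filter p) (fun x => x) with _ | x
  · have h0 : files.filter p = [] := (PySem.List.max?_eq_none_iff _ _).1 hmx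
    have : l = [] := List.Perm.eq_nil (h0 ▸ hperm)
    simp [this]
  · have hx : x ∈ l := hperm.mem_iff.2 (PySem.List.max?_mem hmx)
    have hne : l ≠ [] := List.ne_nil_of_mem hx
    rw [List.getLast?_eq_some_getLast hne]
    have hle1 : x ≤ l.getLast hne := le_getLast_of_pairwise l hpw hne x hx
    have hle2 : l.getLast hne ≤ x :=
      PySem.List.max?_isMax hmx _ (hperm.mem_iff.1 (List.getLast_mem hne))
    exact congrArg some (le_antisymm hle2 hle1)

-- one component of A's loop, as B computes it
lemma component_eq (files : List String) (p : String → Bool) :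
    (PySem.List.sorted files (fun f => f) false).foldl
        (fun a f => if p f then some f else a) none =
      PySem.List.max? (files.filter p) (fun x => x) := by
  rw [PySem.List.foldl_if_eq_foldl_filter, foldl_last, Option.or_none, last_sorted_filter]

-- ===== VERDICT (by name: the statement is the Claim_ definition above) =====
theorem identify_files_spec : Claim_equal_identify_files := by
  intro files _
  unfold Spec_identify_files identify_files identify_files_alt
  simp only [step_eq]
  rw [PySem.List.foldl_prod_mk (f := fun (a : Option String) f => if pImg f then some f else a)
        (g := fun (b : Option String × Option String) f =>
          (if pInst f then some f else b.1, if pSeg f then some f else b.2)),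
      PySem.List.foldl_prod_mk (f := fun (a : Option String) f => if pInst f then some f else a)
        (g := fun (b : Option String) f => if pSeg f then some f else b),
      component_eq, component_eq, component_eq]
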